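-- pv_equiv track=rewrite | github.com/jan25/code_sorted | leetcode/weekly148/zigzag_array.py | oddSolver
-- ===== SOURCE A (Python) =====
-- def oddSolver(nums, st):
--     if len(nums) - 1 - st >= 2:
--         l, r = nums[st], nums[st + 2]
--         l = min(nums[st + 1] - 1, l)
--         r = min(nums[st + 1] - 1, r)
--         diff = nums[st] - l + nums[st + 2] - r
--         nums[st], nums[st + 2] = l, r
--         return diff + oddSolver(nums, st + 2)
--     if len(nums) - 1 - st <= 0: return 0
--     if nums[st + 1] <= nums[st]:
--         diff = nums[st] - (nums[st + 1] - 1)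
--         nums[st] = nums[st + 1] - 1
--         return diff
--     return 0
-- ===== SOURCE B (Python) =====
-- def oddSolver(nums, st):
--     # Iterative accumulator loop instead of A's plain recursion; clamps via min/max
--     # uniformly (same in-place mutation of nums as A).
--     total = 0
--     while len(nums) - 1 - st >= 2:
--         cap = nums[st + 1] - 1
--         total += max(0, nums[st] - cap) + max(0, nums[st + 2] - cap)
--         nums[st], nums[st + 2] = min(cap, nums[st]), min(cap, nums[st + 2])
--         st += 2
--     if len(nums) - 1 - st == 1:
--         cap = nums[st + 1] - 1
--         total += max(0, nums[st] - cap)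
--         nums[st] = min(cap, nums[st])
--     return total
-- ===== Notes on version B (the rewrite author's own statement) =====
-- stated objective: idiomatic
-- what changed: Replaces A's plain recursion (diff + recursive call, with two-stage min clamping and an if-chain tail) by an iterative while-loop with a running accumulator that expresses each decrement as max(0, value - cap) and each clamp uniformly as min(cap, value), including the tail case.
import Mathlib
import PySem

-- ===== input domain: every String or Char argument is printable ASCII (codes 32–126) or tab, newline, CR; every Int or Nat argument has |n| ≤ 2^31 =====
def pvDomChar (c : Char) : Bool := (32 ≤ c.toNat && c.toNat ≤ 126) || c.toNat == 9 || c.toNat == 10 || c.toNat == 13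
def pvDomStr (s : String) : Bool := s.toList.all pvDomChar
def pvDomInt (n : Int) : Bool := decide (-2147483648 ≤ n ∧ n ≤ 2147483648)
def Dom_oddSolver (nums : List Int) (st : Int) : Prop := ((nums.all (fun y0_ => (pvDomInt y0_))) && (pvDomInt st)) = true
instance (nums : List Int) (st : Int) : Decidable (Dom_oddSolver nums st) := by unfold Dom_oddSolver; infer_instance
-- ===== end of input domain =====

-- B replaces A's plain recursion by an accumulator loop with uniform min/max clamping
-- (objective: idiomatic/alternative decomposition); B performs the same in-place
-- mutation of `nums` as A (same cells, observably equal contents); equivalence is about the return value.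

-- ===== PORT A =====
-- pyGetD/pySetD are exact for in-range (possibly negative) Python indices; Pre_ excludes
-- exactly the inputs where Python's nums[...] raises IndexError.
def oddSolver (nums : List Int) (st : Int) : Int :=
  if _h : (nums.length : Int) - 1 - st ≥ 2 then
    let l := PySem.List.pyGetD nums st 0
    let r := PySem.List.pyGetD nums (st + 2) 0
    let l := min (PySem.List.pyGetD nums (st + 1) 0 - 1) l
    let r := min (PySem.List.pyGetD nums (st + 1) 0 - 1) r
    let diff := PySem.List.pyGetD nums st 0 - l + PySem.List.pyGetD nums (st + 2) 0 - r
    let nums' := PySem.List.pySetD (PySem.List.pySetD nums st l) (st + 2) r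
    diff + oddSolver nums' (st + 2)
  else if (nums.length : Int) - 1 - st ≤ 0 then 0
  else if PySem.List.pyGetD nums (st + 1) 0 ≤ PySem.List.pyGetD nums st 0 then
    PySem.List.pyGetD nums st 0 - (PySem.List.pyGetD nums (st + 1) 0 - 1)
  else 0
termination_by ((nums.length : Int) - 1 - st).toNat
decreasing_by simp [PySem.List.length_pySetD]; omega

-- ===== PORT B =====
-- the while-loop of Source B: `total` is the running accumulator
def oddSolverLoop (nums : List Int) (st : Int) (total : Int) : Int :=
  if _h : (nums.length : Int) - 1 - st ≥ 2 then
    let cap := PySem.List.pyGetD nums (st + 1) 0 - 1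
    let total := total + (max 0 (PySem.List.pyGetD nums st 0 - cap)
                          + max 0 (PySem.List.pyGetD nums (st + 2) 0 - cap))
    let nums := PySem.List.pySetD
                  (PySem.List.pySetD nums st (min cap (PySem.List.pyGetD nums st 0)))
                  (st + 2) (min cap (PySem.List.pyGetD nums (st + 2) 0))
    oddSolverLoop nums (st + 2) total
  else if (nums.length : Int) - 1 - st = 1 then
    let cap := PySem.List.pyGetD nums (st + 1) 0 - 1
    total + max 0 (PySem.List.pyGetD nums st 0 - cap)
  else total
termination_by ((nums.length : Int) - 1 - st).toNat
decreasing_by simp [PySem.List.length_pySetD]; omega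

def oddSolver_alt (nums : List Int) (st : Int) : Int :=
  oddSolverLoop nums st 0

-- ===== PRECONDITION & SPEC =====
-- Pre_ excludes exactly the inputs on which Python A raises IndexError:
-- st below -len(nums) while the code still has an element to inspect (len-1-st ≥ 1).
def Pre_oddSolver (nums : List Int) (st : Int) : Prop :=
  -(nums.length : Int) ≤ st ∨ (nums.length : Int) - 1 - st ≤ 0
instance (nums : List Int) (st : Int) : Decidable (Pre_oddSolver nums st) := by
  unfold Pre_oddSolver; infer_instance

def pvWitness_oddSolver : List Int × Int := ([3, 1, 3, 2, 5], 0)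

def Spec_oddSolver (nums : List Int) (st : Int) (out : Int) : Prop := out = oddSolver_alt nums st
instance (nums : List Int) (st : Int) (out : Int) : Decidable (Spec_oddSolver nums st out) := by unfold Spec_oddSolver; infer_instance

-- ===== CLAIM (what is proved, stated in full; the proofs are below) =====
def Claim_equal_oddSolver : Prop := ∀ (nums : List Int) (st : Int), Dom_oddSolver nums st → Pre_oddSolver nums st → Spec_oddSolver nums st (oddSolver nums st)

-- ===== LEMMAS AND PROOFS =====

-- loop/recursion correspondence: the accumulator loop adds A's recursive result to `total`
theorem oddSolverLoop_eq (nums : List Int) (st : Int) (total : Int) :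
    oddSolverLoop nums st total = total + oddSolver nums st := by
  fun_induction oddSolverLoop nums st total with
  | case1 nums st total h cap total' nums' ih =>
      rw [oddSolver]
      simp only [h, dite_true]
      rw [ih]
      simp only [total', nums', cap]
      omega
  | case2 nums st total h h1 =>
      rw [oddSolver]
      simp only [h, dite_false]
      have h2 : ¬ ((nums.length : Int) - 1 - st ≤ 0) := by omega
      simp only [h2, if_false]
      split <;> omega
  | case3 nums st total h h1 =>
      rw [oddSolver]
      simp only [h, dite_false]
      have h2 : (nums.length : Int) - 1 - st ≤ 0 := by omega
      simp only [h2, if_true]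
      omega

-- ===== VERDICT (by name: the statement is the Claim_ definition above) =====
theorem oddSolver_spec : Claim_equal_oddSolver := by
  intro nums st _ _
  unfold Spec_oddSolver oddSolver_alt
  rw [oddSolverLoop_eq]
  omega
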